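-- pv_equiv track=rewrite | github.com/jsgonzalez9/MenuScraper | Desktop/MenuScraper_Playwright/MenuScraper_Playwright/enhanced_menu_scraper.py | is_excluded_content
-- ===== SOURCE A (Python) =====
-- def is_excluded_content(text: str) -> bool:
--     """Check if text should be excluded"""
--     excluded_keywords = [
--         'copyright', 'privacy', 'terms', 'contact', 'address', 'phone',
--         'hours', 'location', 'directions', 'parking', 'website',
--         'follow us', 'social media', 'newsletter', 'subscribe'
--     ]
--
--     text_lower = text.lower()
--     return any(keyword in text_lower for keyword in excluded_keywords)
-- ===== SOURCE B (Python) =====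
-- _KEYWORDS = [
--     'copyright', 'privacy', 'terms', 'contact', 'address', 'phone',
--     'hours', 'location', 'directions', 'parking', 'website',
--     'follow us', 'social media', 'newsletter', 'subscribe'
-- ]
--
--
-- def is_excluded_content(text: str) -> bool:
--     """Single left-to-right scan: at each position, try to match a keyword."""
--     t = text.lower()
--     for i in range(len(t)):
--         for kw in _KEYWORDS:
--             if t.startswith(kw, i):
--                 return True
--     return False
-- ===== Notes on version B (the rewrite author's own statement) =====
-- stated objective: alternative
-- what changed: Instead of running 15 independent whole-text substring searches with the in operator, B makes one left-to-right scan over positions of the lowercased text and at each position tries to match any keyword as a prefix, returning at the first hit.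
import Mathlib
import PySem

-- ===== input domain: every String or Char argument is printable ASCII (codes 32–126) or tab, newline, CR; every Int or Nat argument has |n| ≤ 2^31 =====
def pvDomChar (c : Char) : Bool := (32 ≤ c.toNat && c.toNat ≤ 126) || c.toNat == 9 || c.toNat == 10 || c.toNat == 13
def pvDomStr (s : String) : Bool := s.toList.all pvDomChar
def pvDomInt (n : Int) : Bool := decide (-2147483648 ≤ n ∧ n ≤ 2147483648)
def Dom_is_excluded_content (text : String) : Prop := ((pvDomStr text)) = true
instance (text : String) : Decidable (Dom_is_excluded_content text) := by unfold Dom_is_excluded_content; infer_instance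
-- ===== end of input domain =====

-- B replaces A's 15 independent substring searches with one position-by-position scan that
-- prefix-matches every keyword at each index of the lowercased text (alternative, same cost).


-- ===== PORT A =====
def pvKeywords : List String :=
  ["copyright", "privacy", "terms", "contact", "address", "phone",
   "hours", "location", "directions", "parking", "website",
   "follow us", "social media", "newsletter", "subscribe"]

def is_excluded_content (text : String) : Bool :=
  let text_lower := PySem.Str.lower text
  pvKeywords.any (fun keyword => PySem.Str.isIn keyword text_lower)

-- ===== PORT B =====
def altKeywords : List (List Char) :=
  (["copyright", "privacy", "terms", "contact", "address", "phone",
    "hours", "location", "directions", "parking", "website",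
    "follow us", "social media", "newsletter", "subscribe"]).map String.toList

-- the loop 'for i in range(len(t)): for kw: if t.startswith(kw, i)': recursion over the suffixes of t
def altScan (K : List (List Char)) (l : List Char) : Bool :=
  match l with
  | [] => false
  | _ :: rest => K.any (fun kw => kw.isPrefixOf l) || altScan K rest

def is_excluded_content_alt (text : String) : Bool :=
  altScan altKeywords (PySem.Str.lower text).toList

-- ===== PRECONDITION & SPEC =====
def Spec_is_excluded_content (text : String) (out : Bool) : Prop := out = is_excluded_content_alt text
instance (text : String) (out : Bool) : Decidable (Spec_is_excluded_content text out) := by unfold Spec_is_excluded_content; infer_instance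

-- ===== CLAIM (what is proved, stated in full; the proofs are below) =====
def Claim_equal_is_excluded_content : Prop := ∀ (text : String), Dom_is_excluded_content text → Spec_is_excluded_content text (is_excluded_content text)

-- ===== LEMMAS AND PROOFS =====

theorem altScan_iff (K : List (List Char)) (hK : ∀ kw ∈ K, kw ≠ []) (l : List Char) :
    altScan K l = true ↔ ∃ kw ∈ K, ∃ j, kw <+: l.drop j := by
  induction l with
  | nil =>
    simp [altScan]
    intro h
    exact hK [] h rfl
  | cons c rest ih =>
    simp only [altScan, Bool.or_eq_true, List.any_eq_true, ih]
    constructor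
    · rintro (⟨kw, hkw, hpre⟩ | ⟨kw, hkw, j, hpre⟩)
      · exact ⟨kw, hkw, 0, by simpa using List.isPrefixOf_iff_prefix.mp hpre⟩
      · exact ⟨kw, hkw, j + 1, by simpa using hpre⟩
    · rintro ⟨kw, hkw, j, hpre⟩
      cases j with
      | zero => exact Or.inl ⟨kw, hkw, List.isPrefixOf_iff_prefix.mpr (by simpa using hpre)⟩
      | succ j => exact Or.inr ⟨kw, hkw, j, by simpa using hpre⟩

theorem ports_agree (text : String) : is_excluded_content text = is_excluded_content_alt text := by
  unfold is_excluded_content is_excluded_content_alt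
  rw [Bool.eq_iff_iff]
  rw [altScan_iff altKeywords (by decide)]
  simp only [List.any_eq_true, PySem.Str.isIn_eq, altKeywords, List.mem_map]
  constructor
  · rintro ⟨kw, hkw, h⟩
    rcases (PySem.Chars.exists_prefix_drop_iff_isIn _ _).mpr h with ⟨j, hj⟩
    exact ⟨kw.toList, ⟨kw, hkw, rfl⟩, j, hj⟩
  · rintro ⟨_, ⟨kw, hkw, rfl⟩, j, hj⟩
    exact ⟨kw, hkw, (PySem.Chars.exists_prefix_drop_iff_isIn _ _).mp ⟨j, hj⟩⟩

-- ===== VERDICT (by name: the statement is the Claim_ definition above) =====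
theorem is_excluded_content_spec : Claim_equal_is_excluded_content := by
  intro text _
  unfold Spec_is_excluded_content
  exact ports_agree text
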